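-- pv_equiv track=rewrite | github.com/Xu60069/pythonApp | codeforces/r461/CavePainting.py | remainderSet
-- ===== SOURCE A (Python) =====
-- def remainderSet(n, k):
--     rem=set()
--     for i in range(1,k+1): #computer remainder from 1 to k
--         r=n%i
--         if r in rem:    # return false if exist
--             return False
--         else:           # add to set
--             rem.add(r)
--     return True
-- ===== SOURCE B (Python) =====
-- def remainderSet(n, k):
--     # Distinctness of n%1..n%k forces n%i == i-1 for every i, i.e. lcm(1..k) | n+1.
--     # Build the lcm (stopping once it already exceeds |n+1|) and do one divisibility check.
--     t = n + 1
--     if t == 0: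
--         return True
--     L = 1
--     i = 2
--     while i <= k and L <= abs(t):
--         g = _gcd(L, i)
--         L = L // g * i
--         i += 1
--     return t % L == 0
--
--
-- def _gcd(a, b):
--     while b:
--         a, b = b, a % b
--     return a
-- ===== Notes on version B (the rewrite author's own statement) =====
-- stated objective: alternative
-- what changed: B replaces A's scan that maintains a set of seen remainders by the number-theoretic characterisation: the remainders n%1..n%k are distinct iff lcm(1..k) divides n+1, so B builds the lcm aggregate (stopping once it exceeds |n+1|) and does a single divisibility check.
import Mathlib
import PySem

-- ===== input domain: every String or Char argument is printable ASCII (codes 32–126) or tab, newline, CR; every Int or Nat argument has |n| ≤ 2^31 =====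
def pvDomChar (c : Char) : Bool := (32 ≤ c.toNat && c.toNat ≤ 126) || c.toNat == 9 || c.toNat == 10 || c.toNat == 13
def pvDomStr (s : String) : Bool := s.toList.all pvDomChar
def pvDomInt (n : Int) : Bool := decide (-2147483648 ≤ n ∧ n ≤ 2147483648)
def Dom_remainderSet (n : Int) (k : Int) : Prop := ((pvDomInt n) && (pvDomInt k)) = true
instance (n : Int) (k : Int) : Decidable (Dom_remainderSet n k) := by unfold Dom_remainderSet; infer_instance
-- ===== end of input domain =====

-- B replaces A's seen-remainder set scan by the aggregate characterisation
-- "remainders n%1..n%k distinct iff lcm(1..k) divides n+1": build the lcm, one divisibility check.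

-- ===== PORT A =====
def remSetLoop (n : Int) : List Int → PySem.Set Int → Bool
  | [], _ => true
  | i :: rest, rem =>
    let r := PySem.Int.mod n i
    if PySem.Set.contains rem r then false
    else remSetLoop n rest (PySem.Set.add rem r)

def remainderSet (n : Int) (k : Int) : Bool :=
  remSetLoop n (PySem.List.pyRange 1 (k + 1) 1) PySem.Set.empty

-- ===== PORT B =====
-- B's helper _gcd (hand-written Euclid, ported step for step; PySem.Int.mod is Python's %)
def pyGcd (a b : Int) : Int :=
  if h : b ≠ 0 then pyGcd b (PySem.Int.mod a b) else a
termination_by b.natAbs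
decreasing_by
  rcases lt_or_gt_of_ne h with hb | hb
  · have := PySem.Int.mod_neg_bounds a hb; omega
  · have h1 := PySem.Int.mod_nonneg a hb; have h2 := PySem.Int.mod_lt a hb; omega

-- B's while loop: i, L state; stops when i > k or L > |t|
def altLoop (t k : Int) (i L : Int) : Int :=
  if h : i ≤ k ∧ L ≤ |t| then
    altLoop t k (i + 1) (PySem.Int.floordiv L (pyGcd L i) * i)
  else L
termination_by (k + 1 - i).toNat
decreasing_by omega

def remainderSet_alt (n : Int) (k : Int) : Bool :=
  let t := n + 1
  if t == 0 then true
  else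
    let L := altLoop t k 2 1
    PySem.Int.mod t L == 0

-- ===== PRECONDITION & SPEC =====
def Spec_remainderSet (n : Int) (k : Int) (out : Bool) : Prop := out = remainderSet_alt n k
instance (n : Int) (k : Int) (out : Bool) : Decidable (Spec_remainderSet n k out) := by unfold Spec_remainderSet; infer_instance

-- ===== CLAIM (what is proved, stated in full; the proofs are below) =====
def Claim_equal_remainderSet : Prop := ∀ (n : Int) (k : Int), Dom_remainderSet n k → Spec_remainderSet n k (remainderSet n k)

-- ===== LEMMAS AND PROOFS =====

-- pointwise bridge: for 1 ≤ i, n % i = i - 1 ↔ i ∣ n + 1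
lemma mod_eq_pred_iff_dvd (n i : Int) (hi : 1 ≤ i) :
    PySem.Int.mod n i = i - 1 ↔ i ∣ n + 1 := by
  have hpos : (0 : Int) < i := by omega
  have hdm := PySem.Int.floordiv_mul_add_mod n i
  have h0 := PySem.Int.mod_nonneg n hpos
  have h1 := PySem.Int.mod_lt n hpos
  constructor
  · intro h
    refine ⟨PySem.Int.floordiv n i + 1, ?_⟩
    have hqi : i * PySem.Int.floordiv n i = PySem.Int.floordiv n i * i := mul_comm _ _
    have hx : i * (PySem.Int.floordiv n i + 1) = i * PySem.Int.floordiv n i + i := by ring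
    rw [h] at hdm
    omega
  · rintro ⟨c, hc⟩
    set q := PySem.Int.floordiv n i
    set r := PySem.Int.mod n i
    have hqi : i * q = q * i := mul_comm _ _
    have hrc : r + 1 = i * (c - q) := by
      have hms : i * (c - q) = i * c - i * q := by ring
      omega
    have hd1 : 1 ≤ c - q := by
      by_contra hcq
      have : i * (c - q) ≤ 0 := mul_nonpos_of_nonneg_of_nonpos (by omega) (by omega)
      omega
    have hd2 : c - q ≤ 1 := by
      by_contra hcq
      have h2i : i * 2 ≤ i * (c - q) := mul_le_mul_of_nonneg_left (by omega) (by omega)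
      have : i * 2 = 2 * i := mul_comm _ _
      omega
    have : c - q = 1 := le_antisymm hd2 hd1
    rw [this, mul_one] at hrc; omega

-- A's loop characterisation
lemma remSetLoop_char (n : Int) : ∀ (m : Nat) (j : Int) (rem : PySem.Set Int),
    1 ≤ j → (∀ x, x ∈ rem ↔ 0 ≤ x ∧ x < j - 1) →
    (remSetLoop n (PySem.List.pyRange j (j + m) 1) rem = true ↔
      ∀ i, j ≤ i → i < j + m → PySem.Int.mod n i = i - 1) := by
  intro m
  induction m with
  | zero =>
    intro j rem hj hrem
    rw [Nat.cast_zero, add_zero]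
    have : PySem.List.pyRange j j 1 = [] := by
      rw [PySem.List.pyRange_one]; simp
    rw [this]
    simp [remSetLoop]
    intro i h1 h2; omega
  | succ m ih =>
    intro j rem hj hrem
    have hcons : PySem.List.pyRange j (j + (m + 1 : Nat)) 1
        = j :: PySem.List.pyRange (j + 1) (j + (m + 1 : Nat)) 1 := by
      apply PySem.List.pyRange_one_cons
      push_cast; omega
    have hend : (j : Int) + (m + 1 : Nat) = (j + 1) + m := by push_cast; ring
    rw [hcons, hend]
    have hjpos : (0 : Int) < j := by omega
    have hr0 := PySem.Int.mod_nonneg n hjpos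
    have hr1 := PySem.Int.mod_lt n hjpos
    simp only [remSetLoop]
    by_cases hin : PySem.Int.mod n j ∈ rem
    · have hlt : PySem.Int.mod n j < j - 1 := ((hrem _).mp hin).2
      have hcont : rem.contains (PySem.Int.mod n j) = true :=
        (PySem.Set.contains_iff rem _).mpr hin
      rw [if_pos hcont]
      constructor
      · intro h; exact absurd h (by simp)
      · intro h
        have := h j (le_refl j) (by omega)
        omega
    · have hcont : ¬ rem.contains (PySem.Int.mod n j) = true := by
        rw [PySem.Set.contains_iff]; exact hin
      rw [if_neg hcont]
      have hreq : PySem.Int.mod n j = j - 1 := by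
        rcases lt_or_ge (PySem.Int.mod n j) (j - 1) with h | h
        · exact absurd ((hrem _).mpr ⟨hr0, h⟩) hin
        · omega
      have hrem' : ∀ x, x ∈ PySem.Set.add rem (PySem.Int.mod n j) ↔ 0 ≤ x ∧ x < (j + 1) - 1 := by
        intro x
        rw [PySem.Set.mem_add, hrem x]
        omega
      rw [ih (j + 1) (PySem.Set.add rem (PySem.Int.mod n j)) (by omega) hrem']
      constructor
      · intro h i h1 h2
        rcases eq_or_lt_of_le h1 with he | hlt
        · rw [← he]; exact hreq
        · exact h i (by omega) (by omega)
      · intro h i h1 h2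
        exact h i (by omega) h2

lemma remainderSet_char (n k : Int) :
    remainderSet n k = true ↔ ∀ i, 1 ≤ i → i ≤ k → PySem.Int.mod n i = i - 1 := by
  unfold remainderSet
  rcases le_or_gt k 0 with hk | hk
  · have hnil : PySem.List.pyRange 1 (k + 1) 1 = [] := by
      rw [PySem.List.pyRange_one]
      have h0 : (k + 1 - 1).toNat = 0 := by omega
      rw [h0]
      simp
    rw [hnil]
    constructor
    · intro _ i h1 h2; omega
    · intro _; rfl
  · have h1 : (1 : Int) + k.toNat = k + 1 := by omega
    have := remSetLoop_char n k.toNat 1 PySem.Set.empty (le_refl 1)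
      (by intro x; simp [PySem.Set.empty])
    rw [h1] at this
    rw [this]
    constructor
    · intro h i hi1 hi2; exact h i hi1 (by omega)
    · intro h i hi1 hi2; exact h i hi1 (by omega)

-- pyGcd computes Int.gcd on nonnegative arguments
lemma pyGcd_eq_gcd : ∀ (m : Nat) (a b : Int), b.natAbs = m → 0 ≤ a → 0 ≤ b →
    pyGcd a b = (Int.gcd a b : Int) := by
  intro m
  induction m using Nat.strong_induction_on with
  | _ m ih =>
    intro a b hm ha hb
    rw [pyGcd]
    by_cases hbz : b ≠ 0
    · have hbpos : 0 < b := by omega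
      have hmod : PySem.Int.mod a b = a % b := PySem.Int.mod_eq_emod_of_pos hbpos
      have h0 := Int.emod_nonneg a hbz
      have h1 := Int.emod_lt_of_pos a hbpos
      rw [dif_pos hbz, hmod, ih (a % b).natAbs (by omega) b (a % b) rfl hb h0]
      congr 1
      rw [Int.gcd_comm]
      exact Int.gcd_emod a b
    · rw [dif_neg hbz]
      push_neg at hbz
      rw [hbz, Int.gcd_zero_right, Int.natAbs_of_nonneg ha]

-- one step of B's loop is the lcm
lemma step_eq_lcm (L i : Int) (hL : 0 < L) (hi : 0 < i) :
    PySem.Int.floordiv L (pyGcd L i) * i = (Int.lcm L i : Int) := by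
  have hg : pyGcd L i = (Int.gcd L i : Int) :=
    pyGcd_eq_gcd i.natAbs L i rfl (by omega) (by omega)
  have hgne : Int.gcd L i ≠ 0 := by
    simp [Int.gcd_eq_zero_iff]; omega
  set g : Int := (Int.gcd L i : Int) with hgdef
  have hgpos : 0 < g := by rw [hgdef]; positivity
  obtain ⟨c, hc⟩ := Int.gcd_dvd_left L i
  rw [← hgdef] at hc
  have hfd : PySem.Int.floordiv L (pyGcd L i) = c := by
    rw [hg, PySem.Int.floordiv_eq_ediv_of_pos hgpos, hc,
      Int.mul_ediv_cancel_left _ (by omega)]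
  rw [hfd]
  have hmul : g * (Int.lcm L i : Int) = L * i := by
    rw [hgdef]
    calc (Int.gcd L i : Int) * (Int.lcm L i : Int)
        = ((Int.gcd L i * Int.lcm L i : Nat) : Int) := by push_cast; ring
      _ = (((L * i).natAbs : Nat) : Int) := by
            rw [show Int.gcd L i * Int.lcm L i = (L * i).natAbs by
              rw [Int.natAbs_mul]; exact Int.gcd_mul_lcm L i]
      _ = L * i := by rw [Int.natAbs_of_nonneg (by positivity)]
  apply mul_left_cancel₀ (a := g) (by omega)
  rw [hmul, hc]; ring

lemma lcm_pos (L i : Int) (hL : 0 < L) (hi : 0 < i) : 0 < (Int.lcm L i : Int) := by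
  have h : Int.lcm L i ≠ 0 := by
    unfold Int.lcm
    exact Nat.lcm_ne_zero (Int.natAbs_ne_zero.mpr (by omega)) (Int.natAbs_ne_zero.mpr (by omega))
  positivity

lemma dvd_lcm_iff (L i t : Int) : (Int.lcm L i : Int) ∣ t ↔ L ∣ t ∧ i ∣ t := by
  constructor
  · intro h
    exact ⟨dvd_trans (Int.dvd_lcm_left L i) h, dvd_trans (Int.dvd_lcm_right L i) h⟩
  · rintro ⟨h1, h2⟩
    exact Int.coe_lcm_dvd h1 h2

-- B's loop characterisation
lemma altLoop_dvd (t k : Int) (ht : t ≠ 0) : ∀ (m : Nat) (i L : Int),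
    (k + 1 - i).toNat = m → 2 ≤ i → 0 < L →
    (altLoop t k i L ∣ t ↔ (L ∣ t ∧ ∀ j, i ≤ j → j ≤ k → j ∣ t)) := by
  intro m
  induction m using Nat.strong_induction_on with
  | _ m ih =>
    intro i L hm hi hL
    rw [altLoop]
    by_cases hc : i ≤ k ∧ L ≤ |t|
    · rw [dif_pos hc]
      have hipos : (0 : Int) < i := by omega
      rw [step_eq_lcm L i hL hipos]
      rw [ih ((k + 1 - (i + 1)).toNat) (by omega) (i + 1) _ rfl (by omega)
        (lcm_pos L i hL hipos)]
      rw [dvd_lcm_iff]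
      constructor
      · rintro ⟨⟨hLd, hid⟩, hrest⟩
        refine ⟨hLd, fun j h1 h2 => ?_⟩
        rcases eq_or_lt_of_le h1 with he | hlt
        · rw [← he]; exact hid
        · exact hrest j (by omega) h2
      · rintro ⟨hLd, hall⟩
        exact ⟨⟨hLd, hall i (le_refl i) hc.1⟩, fun j h1 h2 => hall j (by omega) h2⟩
    · rw [dif_neg hc]
      push_neg at hc
      by_cases hik : i ≤ k
      · have hLt : |t| < L := hc hik
        have hnd : ¬ L ∣ t := by
          intro hd
          have h1 : L ∣ |t| := (dvd_abs L t).mpr hd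
          have := Int.le_of_dvd (abs_pos.mpr ht) h1
          omega
        constructor
        · intro h; exact absurd h hnd
        · rintro ⟨h, _⟩; exact absurd h hnd
      · constructor
        · intro h; exact ⟨h, fun j h1 h2 => absurd (le_trans h1 h2) hik⟩
        · rintro ⟨h, _⟩; exact h

lemma remainderSet_alt_char (n k : Int) :
    remainderSet_alt n k = true ↔ ∀ i, 1 ≤ i → i ≤ k → i ∣ (n + 1) := by
  unfold remainderSet_alt
  by_cases ht : n + 1 = 0
  · rw [if_pos (by simp [ht])]
    constructor
    · intro _ i _ _; rw [ht]; exact dvd_zero i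
    · intro _; rfl
  · rw [if_neg (by simp [ht])]
    rw [beq_iff_eq, PySem.Int.mod_eq_zero_iff_dvd]
    rw [altLoop_dvd (n + 1) k ht ((k + 1 - 2).toNat) 2 1 rfl (le_refl 2) one_pos]
    constructor
    · rintro ⟨_, h⟩ i h1 h2
      rcases eq_or_lt_of_le h1 with he | hlt
      · rw [← he]; exact one_dvd _
      · exact h i (by omega) h2
    · intro h
      exact ⟨one_dvd _, fun j h1 h2 => h j (by omega) h2⟩

-- ===== VERDICT (by name: the statement is the Claim_ definition above) =====
theorem remainderSet_spec : Claim_equal_remainderSet := by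
  intro n k _
  unfold Spec_remainderSet
  rw [Bool.eq_iff_iff, remainderSet_char, remainderSet_alt_char]
  constructor
  · intro h i h1 h2
    exact (mod_eq_pred_iff_dvd n i h1).mp (h i h1 h2)
  · intro h i h1 h2
    exact (mod_eq_pred_iff_dvd n i h1).mpr (h i h1 h2)
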